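-- pv_equiv track=rewrite | github.com/KeivanS/SC_SNAPS | sc-snaps-gui.py | _species_blocks
-- ===== SOURCE A (Python) =====
-- def _species_blocks(species_order):
--     """
--     Turn a per-atom species list like [Ba, Ba, ..., O, O, ...]
--     into consecutive blocks [(Ba, 32), (O, 32)].
--
--     Raises if the atoms are not grouped by species in contiguous blocks.
--     """
--     blocks = []
--     seen = set()
--     i = 0
--     n = len(species_order)
--
--     while i < n:
--         name = species_order[i]
--         if name in seen:
--             raise ValueError(
--                 f'Species "{name}" appears in more than one block. '
--                 'This code assumes atoms are sorted by type in contiguous groups.'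
--             )
--         j = i
--         while j < n and species_order[j] == name:
--             j += 1
--         blocks.append((name, j - i))
--         seen.add(name)
--         i = j
--
--     return blocks
-- ===== SOURCE B (Python) =====
-- def _species_blocks(species_order):
--     """
--     Count-then-reconstruct: tally every species once (a dict keeps
--     first-occurrence order), then validate contiguity by rebuilding the
--     list from the tallies and comparing with the input.
--     """
--     counts = {}
--     for name in species_order:
--         counts[name] = counts.get(name, 0) + 1
--     blocks = list(counts.items())
--     rebuilt = [n for name, c in blocks for n in [name] * c]
--     if rebuilt != species_order:
--         raise ValueError(
--             'Atoms are not sorted by type in contiguous groups. '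
--             'Some species appears in more than one block.'
--         )
--     return blocks
-- ===== Notes on version B (the rewrite author's own statement) =====
-- stated objective: alternative
-- what changed: Replaces A's single pass with a nested pointer-advancing run scan by a staged count-then-reconstruct scheme: one tally pass into a dict, blocks read off the dict in first-occurrence order, and contiguity validated by rebuilding the list from the tallies and comparing it with the input.
import Mathlib
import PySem

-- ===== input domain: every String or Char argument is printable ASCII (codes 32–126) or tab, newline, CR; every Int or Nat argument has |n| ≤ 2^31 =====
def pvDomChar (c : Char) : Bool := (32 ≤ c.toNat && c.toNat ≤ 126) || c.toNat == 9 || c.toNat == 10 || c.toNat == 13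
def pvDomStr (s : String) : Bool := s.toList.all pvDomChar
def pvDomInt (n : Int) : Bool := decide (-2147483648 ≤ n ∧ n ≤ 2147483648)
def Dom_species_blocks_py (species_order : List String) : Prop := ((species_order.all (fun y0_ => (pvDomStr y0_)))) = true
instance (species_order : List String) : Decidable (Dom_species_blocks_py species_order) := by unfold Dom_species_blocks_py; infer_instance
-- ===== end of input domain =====

-- B replaces A's single scan with nested run pointers by a staged count-then-reconstruct
-- scheme (tally dict, read blocks off in first-occurrence order, validate by rebuilding);
-- equivalence is claimed where A returns (Pre_ excludes the ValueError inputs).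

-- ===== PORT A =====
-- inner 'while j < n and species_order[j] == name: j += 1' — length of the run of `name`
def pyCountRun (name : String) : List String → Nat
  | [] => 0
  | y :: t => if y == name then pyCountRun name t + 1 else 0

-- the suffix starting at index j after the inner while finishes (i = j)
def pyDropRun (name : String) : List String → List String
  | [] => []
  | y :: t => if y == name then pyDropRun name t else y :: t

theorem pyDropRun_length_le (name : String) : ∀ l : List String, (pyDropRun name l).length ≤ l.length := by
  intro l
  induction l with
  | nil => simp [pyDropRun]
  | cons y t ih =>
    simp only [pyDropRun]
    split
    · exact Nat.le_succ_of_le ih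
    · simp

-- outer 'while i < n' of A, over the suffix starting at index i
def goA : List String → PySem.Set String → List (String × Int) → List (String × Int)
  | [], _, blocks => blocks
  | name :: rest, seen, blocks =>
    if PySem.Set.contains seen name then
      blocks  -- Python raises ValueError here; such inputs are excluded by Pre_
    else
      goA (pyDropRun name rest) (PySem.Set.add seen name)
        (blocks ++ [(name, ((pyCountRun name rest + 1 : Nat) : Int))])
termination_by l => l.length
decreasing_by
  exact Nat.lt_succ_of_le (pyDropRun_length_le name rest)

def species_blocks_py (species_order : List String) : List (String × Int) :=
  goA species_order PySem.Set.empty []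

-- ===== PORT B =====
-- 'for name in species_order: counts[name] = counts.get(name, 0) + 1'
def bCounts (species_order : List String) : PySem.Dict String Int :=
  species_order.foldl (fun d name => d.insert name (d.getD name 0 + 1)) PySem.Dict.empty

-- blocks = list(counts.items()); rebuilt = [n for name, c in blocks for n in [name] * c];
-- 'if rebuilt != species_order: raise ValueError(...)' — the raise is excluded by Pre_
def species_blocks_py_alt (species_order : List String) : List (String × Int) :=
  let blocks := (bCounts species_order).items
  let rebuilt := blocks.flatMap (fun p => List.replicate p.2.toNat p.1)
  if rebuilt == species_order then blocks else []

-- ===== PRECONDITION & SPEC =====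
-- Pre_ excludes exactly the inputs where A raises ValueError: some species occurs in
-- two non-adjacent runs, i.e. the list with consecutive duplicates removed repeats a name.
def Pre_species_blocks_py (species_order : List String) : Prop :=
  (species_order.destutter (· ≠ ·)).Nodup
instance (species_order : List String) : Decidable (Pre_species_blocks_py species_order) := by
  unfold Pre_species_blocks_py; infer_instance

def pvWitness_species_blocks_py : List String := ["Ba", "Ba", "O", "O", "O"]

def Spec_species_blocks_py (species_order : List String) (out : List (String × Int)) : Prop := out = species_blocks_py_alt species_order
instance (species_order : List String) (out : List (String × Int)) : Decidable (Spec_species_blocks_py species_order out) := by unfold Spec_species_blocks_py; infer_instance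

-- ===== CLAIM (what is proved, stated in full; the proofs are below) =====
def Claim_equal_species_blocks_py : Prop := ∀ (species_order : List String), Dom_species_blocks_py species_order → Pre_species_blocks_py species_order → Spec_species_blocks_py species_order (species_blocks_py species_order)

-- ===== LEMMAS AND PROOFS =====

theorem pyDropRun_eq_dropWhile (name : String) (l : List String) :
    pyDropRun name l = l.dropWhile (fun y => y == name) := by
  induction l with
  | nil => rfl
  | cons y t ih =>
    cases hb : (y == name) <;> simp [pyDropRun, List.dropWhile, hb, ih]

theorem pyCountRun_eq_takeWhile (name : String) (l : List String) :
    pyCountRun name l = (l.takeWhile (fun y => y == name)).length := by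
  induction l with
  | nil => rfl
  | cons y t ih =>
    cases hb : (y == name) <;> simp [pyCountRun, List.takeWhile, hb, ih]

theorem destutter'_eq_cons (x : String) (l : List String) :
    List.destutter' (· ≠ ·) x l = x :: (l.dropWhile (fun y => y == x)).destutter (· ≠ ·) := by
  induction l generalizing x with
  | nil => rfl
  | cons b t ih =>
    cases hb : (b == x) with
    | false =>
      have h : x ≠ b := (ne_of_beq_false hb).symm
      rw [List.destutter', if_pos h]
      simp [List.dropWhile, hb, List.destutter]
    | true =>
      have h : b = x := beq_iff_eq.mp hb
      subst h
      rw [List.destutter', if_neg (by simp)]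
      simpa [List.dropWhile] using ih b

-- membership survives removing consecutive duplicates
theorem mem_destutter : ∀ (l : List String) (a : String), a ∈ l → a ∈ l.destutter (· ≠ ·)
  | [], a, h => absurd h (by simp)
  | x :: rest, a, h => by
    rw [List.destutter, destutter'_eq_cons]
    rcases List.mem_cons.mp h with rfl | hr
    · exact List.mem_cons_self
    · by_cases hax : a = x
      · simp [hax]
      · have hd : a ∈ rest.dropWhile (fun y => y == x) := by
          have := List.takeWhile_append_dropWhile (p := fun y => y == x) (l := rest)
          rw [← this] at hr
          rcases List.mem_append.mp hr with ht | hd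
          · have hax' := List.mem_takeWhile_imp (l := rest) (p := fun y => y == x) ht
            exact absurd (beq_iff_eq.mp hax') hax
          · exact hd
        exact List.mem_cons_of_mem _ (mem_destutter _ a hd)
termination_by l => l.length
decreasing_by
  exact Nat.lt_succ_of_le (List.length_dropWhile_le _ _)

-- a nonempty run collapses to a one-element set
theorem ofList_replicate (x : String) : ∀ k : Nat, PySem.Set.ofList (List.replicate (k + 1) x) = [x] := by
  intro k
  induction k with
  | zero => simp [PySem.Set.ofList_cons, PySem.Set.ofList_nil, PySem.Set.discard]
  | succ m ih =>
    rw [List.replicate_succ, PySem.Set.ofList_cons, ih]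
    simp [PySem.Set.discard]

-- key decomposition: counter of a fresh run prepended to the rest
theorem counter_items_run (x : String) (k : Nat) (rest : List String) (hx : x ∉ rest) :
    (PySem.Dict.counter (List.replicate (k + 1) x ++ rest)).items
      = (x, ((k + 1 : Nat) : Int)) :: (PySem.Dict.counter rest).items := by
  rw [PySem.Dict.items_counter, PySem.Dict.items_counter]
  have hset : PySem.Set.ofList (List.replicate (k + 1) x ++ rest) = x :: PySem.Set.ofList rest := by
    rw [PySem.Set.ofList_append, ofList_replicate, PySem.Set.update_eq_append_filter]
    have hfil : (PySem.Set.ofList rest).filter (fun y => !(PySem.Set.contains [x] y)) = PySem.Set.ofList rest := by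
      apply List.filter_eq_self.mpr
      intro y hy
      have hyr : y ∈ rest := (PySem.Set.mem_ofList _ _).mp hy
      have : y ≠ x := fun h => hx (h ▸ hyr)
      simp [PySem.Set.contains, this]
    rw [hfil]
    rfl
  rw [hset, List.map_cons]
  congr 1
  · have hc : (List.replicate (k + 1) x ++ rest).count x = k + 1 := by
      rw [List.count_append, List.count_replicate_self, List.count_eq_zero.mpr hx]
    simp [hc]
  · apply List.map_congr_left
    intro y hy
    have hyr : y ∈ rest := (PySem.Set.mem_ofList _ _).mp hy
    have hyx : y ≠ x := fun h => hx (h ▸ hyr)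
    have hc : (List.replicate (k + 1) x ++ rest).count y = rest.count y := by
      simp [List.count_append, List.count_replicate, Ne.symm hyx]
    simp [hc]

-- the run at the head of l, as a replicate decomposition
theorem head_run_decomp (x : String) (rest : List String) :
    x :: rest = List.replicate ((rest.takeWhile (fun y => y == x)).length + 1) x
      ++ rest.dropWhile (fun y => y == x) := by
  have htake : rest.takeWhile (fun y => y == x)
      = List.replicate (rest.takeWhile (fun y => y == x)).length x := by
    apply List.eq_replicate_of_mem
    intro b hb
    have hb' := List.mem_takeWhile_imp (l := rest) (p := fun y => y == x) hb
    exact beq_iff_eq.mp hb'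
  calc x :: rest = x :: (rest.takeWhile (fun y => y == x) ++ rest.dropWhile (fun y => y == x)) := by
        rw [List.takeWhile_append_dropWhile]
    _ = _ := by rw [List.replicate_succ, List.cons_append, ← htake]

-- under Pre_, the head species never recurs after its run
theorem head_not_mem_drop (x : String) (rest : List String)
    (h : ((x :: rest).destutter (· ≠ ·)).Nodup) :
    x ∉ rest.dropWhile (fun y => y == x) := by
  rw [List.destutter, destutter'_eq_cons, List.nodup_cons] at h
  intro hmem
  exact h.1 (mem_destutter _ x hmem)

theorem pre_drop (x : String) (rest : List String)
    (h : ((x :: rest).destutter (· ≠ ·)).Nodup) :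
    ((rest.dropWhile (fun y => y == x)).destutter (· ≠ ·)).Nodup := by
  rw [List.destutter, destutter'_eq_cons, List.nodup_cons] at h
  exact h.2

-- A's recursion produces exactly the counter items, given Pre_ and a disjoint seen set
theorem goA_eq_counter : ∀ (l : List String) (seen : PySem.Set String) (blocks : List (String × Int)),
    (l.destutter (· ≠ ·)).Nodup →
    (∀ a ∈ l, a ∉ seen) →
    goA l seen blocks = blocks ++ (PySem.Dict.counter l).items
  | [], seen, blocks, _, _ => by
    simp [goA, PySem.Dict.counter, PySem.Dict.empty]
  | x :: rest, seen, blocks, hpre, hseen => by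
    have hx : x ∉ seen := hseen x (by simp)
    have hcond : ¬ (PySem.Set.contains seen x = true) := by
      simpa [PySem.Set.contains_iff] using hx
    rw [goA, if_neg hcond, pyDropRun_eq_dropWhile, pyCountRun_eq_takeWhile]
    set rest' := rest.dropWhile (fun y => y == x) with hrest'
    set k := (rest.takeWhile (fun y => y == x)).length with hk
    have hxr : x ∉ rest' := head_not_mem_drop x rest hpre
    have ih := goA_eq_counter rest' (PySem.Set.add seen x)
      (blocks ++ [(x, ((k + 1 : Nat) : Int))])
      (pre_drop x rest hpre)
      (fun a ha => by
        rw [PySem.Set.mem_add]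
        rintro (h1 | rfl)
        · have : a ∈ rest := (List.dropWhile_sublist _).mem ha
          exact hseen a (List.mem_cons_of_mem _ this) h1
        · exact hxr ha)
    rw [ih]
    have hdec : x :: rest = List.replicate (k + 1) x ++ rest' := head_run_decomp x rest
    rw [hdec, counter_items_run x k rest' hxr]
    simp
termination_by l => l.length
decreasing_by
  exact Nat.lt_succ_of_le (List.length_dropWhile_le _ _)

-- under Pre_, rebuilding the list from the tallies gives back the list
theorem rebuilt_eq : ∀ (l : List String),
    (l.destutter (· ≠ ·)).Nodup →
    ((PySem.Dict.counter l).items).flatMap (fun p => List.replicate p.2.toNat p.1) = l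
  | [], _ => by simp [PySem.Dict.counter, PySem.Dict.empty]
  | x :: rest, hpre => by
    set rest' := rest.dropWhile (fun y => y == x) with hrest'
    set k := (rest.takeWhile (fun y => y == x)).length with hk
    have hxr : x ∉ rest' := head_not_mem_drop x rest hpre
    have hdec : x :: rest = List.replicate (k + 1) x ++ rest' := head_run_decomp x rest
    rw [hdec, counter_items_run x k rest' hxr, List.flatMap_cons,
      rebuilt_eq rest' (pre_drop x rest hpre)]
    simp
termination_by l => l.length
decreasing_by
  exact Nat.lt_succ_of_le (List.length_dropWhile_le _ _)

-- ===== VERDICT (by name: the statement is the Claim_ definition above) =====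
theorem species_blocks_py_spec : Claim_equal_species_blocks_py := by
  intro xs _ hpre
  unfold Spec_species_blocks_py species_blocks_py species_blocks_py_alt
  have hb : bCounts xs = PySem.Dict.counter xs := PySem.Dict.foldl_insert_getD_add_one_eq_counter xs
  have hre : ((PySem.Dict.counter xs).items).flatMap (fun p => List.replicate p.2.toNat p.1) = xs :=
    rebuilt_eq xs hpre
  rw [goA_eq_counter xs PySem.Set.empty [] hpre (fun a _ => by simp [PySem.Set.empty])]
  simp [hb, hre]
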